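-- pv_equiv track=rewrite | github.com/kts9208/Sugar_substitue_2025_Heo | examples/generate_all_model_cases.py | filter_valid_cases
-- ===== SOURCE A (Python) =====
-- from typing import List, Dict, Tuple
--
-- def filter_valid_cases(
--     main_lvs: List[str],
--     interactions: List[Tuple[str, str]]
-- ) -> bool:
--     """
--     유효한 모델 조합인지 검증
--
--     규칙:
--     1. 상호작용이 있으면 해당 LV의 주효과도 있어야 함
--     2. 예: PI×label이 있으면 PI 주효과 필수
--
--     Args:
--         main_lvs: 주효과 LV 리스트
--         interactions: 상호작용 리스트
--
--     Returns:
--         유효하면 True, 아니면 False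
--     """
--     if not interactions:
--         return True  # 상호작용이 없으면 항상 유효
--
--     # 상호작용에 사용된 LV 추출
--     interaction_lvs = set(lv for lv, _ in interactions)
--
--     # 모든 상호작용 LV가 주효과에 포함되어야 함
--     return interaction_lvs.issubset(set(main_lvs))
-- ===== SOURCE B (Python) =====
-- from typing import List, Tuple
--
-- def filter_valid_cases(
--     main_lvs: List[str],
--     interactions: List[Tuple[str, str]]
-- ) -> bool:
--     # Elimination sieve: start from the interaction LVs still needing a main
--     # effect, and let each main-effect LV prune its matches; valid iff nothing
--     # remains unpruned.
--     pending = [lv for lv, _ in interactions]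
--     for m in main_lvs:
--         pending = [lv for lv in pending if lv != m]
--     return not pending
-- ===== Notes on version B (the rewrite author's own statement) =====
-- stated objective: alternative
-- what changed: Inverts the traversal: instead of testing each interaction LV for membership (set subset), B loops over main_lvs as an elimination sieve that prunes matching pending interaction LVs, and returns whether the pending list ends empty.
import Mathlib
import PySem

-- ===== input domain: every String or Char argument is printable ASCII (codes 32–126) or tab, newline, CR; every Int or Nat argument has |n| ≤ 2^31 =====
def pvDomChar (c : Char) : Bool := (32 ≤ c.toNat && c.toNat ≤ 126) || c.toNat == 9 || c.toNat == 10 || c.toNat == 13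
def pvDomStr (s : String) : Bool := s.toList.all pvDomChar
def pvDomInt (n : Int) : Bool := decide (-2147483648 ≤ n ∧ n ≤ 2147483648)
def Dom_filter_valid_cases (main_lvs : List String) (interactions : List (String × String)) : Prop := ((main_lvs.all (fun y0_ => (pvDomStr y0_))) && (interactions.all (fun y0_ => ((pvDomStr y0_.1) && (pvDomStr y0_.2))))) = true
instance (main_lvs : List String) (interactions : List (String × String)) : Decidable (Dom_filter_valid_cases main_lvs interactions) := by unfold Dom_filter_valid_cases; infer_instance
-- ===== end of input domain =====

-- B inverts the traversal: an elimination sieve over main_lvs pruning pending interaction LVs, valid iff nothing remains (alternative decomposition, not faster).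

-- ===== PORT A =====
def filter_valid_cases (main_lvs : List String) (interactions : List (String × String)) : Bool :=
  if interactions = [] then true
  else
    let interaction_lvs : PySem.Set String := PySem.Set.ofList (interactions.map (fun p => p.1))
    PySem.Set.issubset interaction_lvs (PySem.Set.ofList main_lvs)

-- ===== PORT B =====
def filter_valid_cases_alt (main_lvs : List String) (interactions : List (String × String)) : Bool :=
  let pending := interactions.map (fun p => p.1)
  let remaining := main_lvs.foldl (fun p m => p.filter (fun lv => lv ≠ m)) pending
  remaining.isEmpty

-- ===== PRECONDITION & SPEC =====
def Spec_filter_valid_cases (main_lvs : List String) (interactions : List (String × String)) (out : Bool) : Prop := out = filter_valid_cases_alt main_lvs interactions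
instance (main_lvs : List String) (interactions : List (String × String)) (out : Bool) : Decidable (Spec_filter_valid_cases main_lvs interactions out) := by unfold Spec_filter_valid_cases; infer_instance

-- ===== CLAIM (what is proved, stated in full; the proofs are below) =====
def Claim_equal_filter_valid_cases : Prop := ∀ (main_lvs : List String) (interactions : List (String × String)), Dom_filter_valid_cases main_lvs interactions → Spec_filter_valid_cases main_lvs interactions (filter_valid_cases main_lvs interactions)

-- ===== LEMMAS AND PROOFS =====

-- The sieve's fold equals a single filter by non-membership in main_lvs.
theorem sieve_eq_filter (main_lvs : List String) (pending : List String) :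
    main_lvs.foldl (fun p m => p.filter (fun lv => lv ≠ m)) pending
      = pending.filter (fun lv => decide (lv ∉ main_lvs)) := by
  induction main_lvs generalizing pending with
  | nil => simp
  | cons m rest ih =>
    simp only [List.foldl_cons, ih, List.filter_filter]
    apply List.filter_congr
    intro lv _
    by_cases h : lv = m <;> simp [h]

theorem alt_eq_true_iff (main_lvs : List String) (interactions : List (String × String)) :
    filter_valid_cases_alt main_lvs interactions = true ↔
      ∀ p ∈ interactions, p.1 ∈ main_lvs := by
  unfold filter_valid_cases_alt
  dsimp only
  rw [sieve_eq_filter]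
  simp

theorem a_eq_true_iff (main_lvs : List String) (interactions : List (String × String)) :
    filter_valid_cases main_lvs interactions = true ↔
      ∀ p ∈ interactions, p.1 ∈ main_lvs := by
  unfold filter_valid_cases
  split
  · simp_all
  · simp [PySem.Set.issubset_iff, PySem.Set.mem_ofList]

-- ===== VERDICT (by name: the statement is the Claim_ definition above) =====
theorem filter_valid_cases_spec : Claim_equal_filter_valid_cases := by
  intro main_lvs interactions _
  unfold Spec_filter_valid_cases
  rw [Bool.eq_iff_iff, a_eq_true_iff, alt_eq_true_iff]
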